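-- pv_equiv track=rewrite | github.com/jorzel/codefights | challange/roadSigns.py | roadSigns
-- ===== SOURCE A (Python) =====
-- def roadSigns(sign):
--     sign = [(len(line.split()), line.split()) for line in sign]
--     n = max(sign)[0]
--     output = ""
--     for i in range(n):
--         for size, line in sign:
--             if size > i:
--                 if output and output[-1] in ('.', '?', '!'):
--                     word = line[i].capitalize()
--                 else:
--                     word = line[i].lower()
--                 if word[0] not in ('!', '?', '.'):
--                     output += " "
--                 output += word
--     return output[1:2].upper() + output[2:]
-- ===== SOURCE B (Python) =====
-- def roadSigns(sign):
--     # One pass: bucket each word by its column index, then emit columns in order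
--     # with an explicit "capitalize next" flag and join the pieces at the end.
--     buckets = []
--     for line in sign:
--         for j, w in enumerate(line.split()):
--             if j == len(buckets):
--                 buckets.append([])
--             buckets[j].append(w)
--     pieces = []
--     cap = False
--     for col in buckets:
--         for w in col:
--             word = w.capitalize() if cap else w.lower()
--             if word[0] not in "!?.":
--                 pieces.append(" ")
--             pieces.append(word)
--             cap = word[-1] in ".?!"
--     s = "".join(pieces)
--     return s[1:2].upper() + s[2:]
-- ===== Notes on version B (the rewrite author's own statement) =====
-- stated objective: faster
-- what changed: Instead of scanning every line once per column index (outer loop over range(max words), inner pass over all lines with a size guard, re-splitting logic per cell), B splits each line once and drops every word into a per-column bucket in a single pass, then emits the buckets in order with an explicit capitalize-next flag and a join of collected pieces.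
import Mathlib
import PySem

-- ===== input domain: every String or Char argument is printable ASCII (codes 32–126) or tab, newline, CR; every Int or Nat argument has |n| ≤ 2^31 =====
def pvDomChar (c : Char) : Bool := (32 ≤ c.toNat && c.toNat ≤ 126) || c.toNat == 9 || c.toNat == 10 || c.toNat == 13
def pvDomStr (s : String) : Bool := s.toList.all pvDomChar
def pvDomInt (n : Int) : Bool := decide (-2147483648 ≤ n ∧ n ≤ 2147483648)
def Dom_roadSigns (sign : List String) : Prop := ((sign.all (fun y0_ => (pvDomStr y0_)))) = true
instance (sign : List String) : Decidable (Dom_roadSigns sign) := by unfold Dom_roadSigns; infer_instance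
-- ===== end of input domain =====

-- B splits each line once and buckets every word by its column index in one pass, instead of
-- rescanning all lines once per column index; measured objective: faster.

-- shared helper: str.capitalize() — first character upper-cased, the rest lower-cased; exact on ASCII
def pyCapitalize (cs : List Char) : List Char :=
  match cs with
  | [] => []
  | c :: t => PySem.Chars.upperChar c :: PySem.Chars.lower t

-- ===== PORT A =====
-- A-side helper: the body of A's innermost guarded block (word choice, optional space, append)
def emitA (output : List Char) (w : List Char) : List Char :=
  let word := if output ≠ [] ∧ (PySem.List.pyGetD output (-1) ' ') ∈ ['.', '?', '!']
              then pyCapitalize w else PySem.Chars.lower w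
  let output := if (PySem.List.pyGetD word 0 ' ') ∈ ['!', '?', '.'] then output
                else output ++ [' ']
  output ++ word

def roadSigns (sign : List String) : String :=
  let sgn : List (Int × List (List Char)) :=
    sign.map (fun line =>
      (((PySem.Chars.split₀ line.toList).length : Int), PySem.Chars.split₀ line.toList))
  match sgn with
  | [] => ""   -- unreachable under Pre_: Python's max([]) raises ValueError on sign = []
  | h :: t =>
    -- n = max(sign)[0]: Python's max keeps the first maximum, tuples compared lexicographically
    let n : Int :=
      (t.foldl (fun acc x =>
        if acc.1 < x.1 ∨ (acc.1 = x.1 ∧ acc.2 < x.2) then x else acc) h).1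
    let output : List Char :=
      (PySem.List.pyRange 0 n 1).foldl (fun output i =>
        (h :: t).foldl (fun output p =>
          if i < p.1 then
            -- line[i]: in range because the guard gives i < len(line); default never read
            emitA output ((PySem.List.pyGet? p.2 i).getD [])
          else output) output) []
    String.ofList (PySem.Chars.upper (PySem.List.slice output (some 1) (some 2)) ++
                   PySem.List.slice output (some 2) none)

-- ===== PORT B =====
-- B-side helper: one enumerate step of the bucket-building pass
def bucketStep (bk : List (List (List Char))) (jw : Int × List Char) : List (List (List Char)) :=
  let bk := if jw.1 = (bk.length : Int) then bk ++ [([] : List (List Char))] else bk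
  PySem.List.pySetD bk jw.1 (PySem.List.pyGetD bk jw.1 [] ++ [jw.2])

-- B-side helper: one emission step over the (pieces, capitalize-next) state
def emitB (st : List (List Char) × Bool) (w : List Char) : List (List Char) × Bool :=
  let word := if st.2 then pyCapitalize w else PySem.Chars.lower w
  let pieces := if (PySem.List.pyGetD word 0 ' ') ∈ ['!', '?', '.'] then st.1 ++ [word]
                else st.1 ++ [[' '], word]
  (pieces, decide ((PySem.List.pyGetD word (-1) ' ') ∈ ['.', '?', '!']))

def roadSigns_alt (sign : List String) : String :=
  let buckets : List (List (List Char)) :=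
    sign.foldl (fun bk line =>
      (PySem.List.enumerate (PySem.Chars.split₀ line.toList) 0).foldl bucketStep bk) []
  let res : List (List Char) × Bool :=
    buckets.foldl (fun st col => col.foldl emitB st) ([], false)
  let s := PySem.Chars.join [] res.1
  String.ofList (PySem.Chars.upper (PySem.List.slice s (some 1) (some 2)) ++
                 PySem.List.slice s (some 2) none)

-- ===== PRECONDITION & SPEC =====
-- Pre_ excludes only the empty list, on which Python's A raises ValueError (max of an empty sequence).
def Pre_roadSigns (sign : List String) : Prop := sign ≠ []
instance (sign : List String) : Decidable (Pre_roadSigns sign) := by unfold Pre_roadSigns; infer_instance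
def pvWitness_roadSigns : List String := ["go left. now", "stop here"]

def Spec_roadSigns (sign : List String) (out : String) : Prop := out = roadSigns_alt sign
instance (sign : List String) (out : String) : Decidable (Spec_roadSigns sign out) := by unfold Spec_roadSigns; infer_instance

-- ===== CLAIM (what is proved, stated in full; the proofs are below) =====
def Claim_equal_roadSigns : Prop := ∀ (sign : List String), Dom_roadSigns sign → Pre_roadSigns sign → Spec_roadSigns sign (roadSigns sign)

-- ===== LEMMAS AND PROOFS =====


-- the words of column j, in line order; the maximal word count; all columns in order
def pvColWords (L : List (List (List Char))) (j : Nat) : List (List Char) :=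
  L.filterMap (fun l => l[j]?)

def pvMaxLen (L : List (List (List Char))) : Nat :=
  L.foldl (fun a l => max a l.length) 0

def pvCols (L : List (List (List Char))) : List (List (List Char)) :=
  (List.range (pvMaxLen L)).map (pvColWords L)

-- appending one line's words to the bucket list, column by column
def pvColAppend : List (List (List Char)) → List (List Char) → List (List (List Char))
  | bk, [] => bk
  | [], w :: ws => [w] :: pvColAppend [] ws
  | b :: bk, w :: ws => (b ++ [w]) :: pvColAppend bk ws

-- fst of Python's lexicographic running max = running max of the fsts
lemma fst_foldl_lex (t : List (Int × List (List Char))) (h : Int × List (List Char)) :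
    (t.foldl (fun acc x =>
      if acc.1 < x.1 ∨ (acc.1 = x.1 ∧ acc.2 < x.2) then x else acc) h).1
    = t.foldl (fun a x => max a x.1) h.1 := by
  induction t generalizing h with
  | nil => rfl
  | cons x t ih =>
    simp only [List.foldl_cons, ih]
    congr 1
    rcases lt_trichotomy h.1 x.1 with hlt | heq | hgt
    · rw [if_pos (Or.inl hlt)]; omega
    · split <;> omega
    · rw [if_neg (by rintro (h1 | ⟨h1, _⟩) <;> omega)]; omega

-- Int running max of a Nat-valued projection = the Nat running max, cast
lemma foldl_max_cast {α : Type} (t : List α) (f : α → Nat) (a : Nat) :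
    t.foldl (fun acc x => max acc ((f x : Nat) : Int)) (a : Int)
      = ((t.foldl (fun acc x => max acc (f x)) a : Nat) : Int) := by
  induction t generalizing a with
  | nil => rfl
  | cons x t ih => simp only [List.foldl_cons, ← Nat.cast_max, ih]

lemma length_le_pvMaxLen (L : List (List (List Char))) (l : List (List Char)) (hl : l ∈ L) :
    l.length ≤ pvMaxLen L :=
  (PySem.List.le_foldl_max_nat L (fun l => l.length) 0).2 l hl

lemma pvColWords_of_ge (L : List (List (List Char))) (j : Nat) (hj : pvMaxLen L ≤ j) :
    pvColWords L j = [] := by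
  unfold pvColWords
  rw [List.filterMap_eq_nil_iff]
  intro l hl
  have := length_le_pvMaxLen L l hl
  exact List.getElem?_eq_none (by omega)

lemma pvCols_getD (L : List (List (List Char))) (j : Nat) :
    (pvCols L).getD j [] = pvColWords L j := by
  by_cases hj : j < pvMaxLen L
  · unfold pvCols
    rw [List.getD_eq_getElem?_getD]
    simp [List.getElem?_map, List.getElem?_range hj]
  · unfold pvCols
    rw [List.getD_eq_getElem?_getD, List.getElem?_eq_none (by simp; omega)]
    simp [pvColWords_of_ge L j (by omega)]

lemma pvColAppend_eq (bk : List (List (List Char))) (ws : List (List Char)) :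
    pvColAppend bk ws
      = (List.range (max bk.length ws.length)).map (fun j => bk.getD j [] ++ (ws[j]?.toList)) := by
  induction ws generalizing bk with
  | nil =>
    simp only [pvColAppend, List.length_nil, Nat.max_zero]
    apply List.ext_getElem
    · simp
    · intro i h1 h2
      simp [List.getD_eq_getElem?_getD, List.getElem?_eq_getElem h1]
  | cons w ws ih =>
    cases bk with
    | nil =>
      simp only [pvColAppend, ih]
      rw [show max ([] : List (List (List Char))).length (w :: ws).length = max ([] : List (List (List Char))).length ws.length + 1 by simp]
      rw [List.range_succ_eq_map]
      simp only [List.map_cons, List.map_map, List.cons.injEq]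
      exact ⟨rfl, List.map_congr_left (fun j hj => rfl)⟩
    | cons b bk =>
      simp only [pvColAppend, ih]
      rw [show (b :: bk).length = bk.length + 1 by simp,
          show (w :: ws).length = ws.length + 1 by simp,
          Nat.succ_max_succ]
      rw [List.range_succ_eq_map]
      simp only [List.map_cons, List.map_map, List.cons.injEq]
      exact ⟨by simp, List.map_congr_left (fun j hj => rfl)⟩

lemma pvColAppend_cols (P : List (List (List Char))) (ws : List (List Char)) :
    pvColAppend (pvCols P) ws = pvCols (P ++ [ws]) := by
  rw [pvColAppend_eq]
  unfold pvCols
  have hmax : pvMaxLen (P ++ [ws]) = max (pvMaxLen P) ws.length := by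
    unfold pvMaxLen; rw [List.foldl_append]; rfl
  rw [show (List.map (pvColWords P) (List.range (pvMaxLen P))).length = pvMaxLen P by simp, hmax]
  apply List.map_congr_left
  intro j hj
  have := pvCols_getD P j
  unfold pvCols at this
  rw [this]
  unfold pvColWords
  rw [List.filterMap_append]
  congr 1

-- building buckets from the columns of the already-processed lines
lemma foldl_colAppend_cols (L : List (List (List Char))) :
    L.foldl pvColAppend [] = pvCols L := by
  induction L using List.reverseRecOn with
  | nil => rfl
  | append_singleton P ws ih => rw [List.foldl_append]; simp [ih, pvColAppend_cols]

lemma enum_fold_colAppend (ws : List (List Char)) (bk : List (List (List Char))) (s : Nat)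
    (hs : s ≤ bk.length) :
    (PySem.List.enumerate ws (s : Int)).foldl bucketStep bk
      = bk.take s ++ pvColAppend (bk.drop s) ws := by
  induction ws generalizing bk s with
  | nil => simp [PySem.List.enumerate, pvColAppend]
  | cons w ws ih =>
    rw [PySem.List.enumerate_cons, List.foldl_cons]
    have hcast : (s : Int) + 1 = ((s + 1 : Nat) : Int) := by push_cast; ring
    by_cases hsb : s = bk.length
    · -- new bucket appended, word set at index s
      have hstep : bucketStep bk ((s : Int), w) = bk ++ [[w]] := by
        unfold bucketStep
        rw [if_pos (show ((s:Int), w).1 = (bk.length : Int) by simp; exact_mod_cast hsb)]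
        simp only
        rw [PySem.List.pySetD_natCast, PySem.List.pyGetD_natCast]
        rw [hsb]
        rw [List.getD_eq_getElem?_getD, List.getElem?_concat_length]
        simp [List.set_eq_take_cons_drop _ (by simp : bk.length < (bk ++ [([] : List (List Char))]).length)]
      rw [hstep, hcast, ih (bk ++ [[w]]) (s+1) (by simp; omega)]
      rw [show (bk ++ [[w]]).take (s+1) = bk ++ [[w]] from List.take_of_length_le (by simp; omega)]
      rw [show (bk ++ [[w]]).drop (s+1) = [] from List.drop_of_length_le (by simp; omega)]
      rw [show bk.take s = bk from List.take_of_length_le (by omega)]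
      rw [show bk.drop s = [] from List.drop_of_length_le (by omega)]
      simp [pvColAppend]
    · have hlt : s < bk.length := by omega
      have hstep : bucketStep bk ((s : Int), w) = bk.set s (bk[s] ++ [w]) := by
        unfold bucketStep
        rw [if_neg (show ¬ ((s:Int), w).1 = (bk.length : Int) by simp; exact_mod_cast hsb)]
        simp only
        rw [PySem.List.pySetD_natCast, PySem.List.pyGetD_natCast]
        rw [List.getD_eq_getElem?_getD, List.getElem?_eq_getElem hlt]
        rfl
      rw [hstep, hcast, ih _ (s+1) (by simp; omega)]
      have h1 : (bk.set s (bk[s] ++ [w])).take (s+1) = bk.take s ++ [bk[s] ++ [w]] := by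
        rw [List.set_eq_take_cons_drop _ hlt]
        rw [show s + 1 = (bk.take s).length + 1 by simp [List.length_take]; omega]
        rw [List.take_append]
        simp
      have h2 : (bk.set s (bk[s] ++ [w])).drop (s+1) = bk.drop (s+1) := by
        rw [List.set_eq_take_cons_drop _ hlt]
        rw [show s + 1 = (bk.take s).length + 1 by simp [List.length_take]; omega]
        rw [List.drop_append]
        simp
      rw [h1, h2]
      rw [show bk.drop s = bk[s] :: bk.drop (s+1) from List.drop_eq_getElem_cons hlt]
      rw [show pvColAppend (bk[s] :: bk.drop (s+1)) (w :: ws) = (bk[s] ++ [w]) :: pvColAppend (bk.drop (s+1)) ws from rfl]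
      simp

lemma inner_fold_col (L : List (List (List Char))) (j : Nat) (st : List Char) :
    (L.map (fun l => ((l.length : Int), l))).foldl (fun output p =>
        if (j : Int) < p.1 then emitA output ((PySem.List.pyGet? p.2 (j : Int)).getD [])
        else output) st
      = (pvColWords L j).foldl emitA st := by
  induction L generalizing st with
  | nil => rfl
  | cons l L ih =>
    simp only [List.map_cons, List.foldl_cons]
    by_cases hk : j < l.length
    · rw [if_pos (by exact_mod_cast hk)]
      rw [PySem.List.pyGet?_natCast, List.getElem?_eq_getElem hk]
      simp only [Option.getD_some]
      rw [ih]
      unfold pvColWords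
      rw [show (List.filterMap (fun l => l[j]?) (l :: L)) = l[j] :: List.filterMap (fun l => l[j]?) L from by
        rw [List.filterMap_cons, List.getElem?_eq_getElem hk]]
      rfl
    · rw [if_neg (by exact_mod_cast hk)]
      rw [ih]
      unfold pvColWords
      rw [show (List.filterMap (fun l => l[j]?) (l :: L)) = List.filterMap (fun l => l[j]?) L from by
        rw [List.filterMap_cons, List.getElem?_eq_none (l := l) (by omega)]]

lemma split₀_go_ne_nil (s : List Char) : ∀ (cur : List Char) (acc : List (List Char)),
    (∀ t ∈ acc, t ≠ []) → ∀ t ∈ PySem.Chars.split₀.go s cur acc, t ≠ [] := by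
  induction s with
  | nil =>
    intro cur acc hacc t ht
    rw [PySem.Chars.split₀.go] at ht
    by_cases hc : cur.isEmpty
    · rw [if_pos hc] at ht
      exact hacc t (List.mem_reverse.1 ht)
    · rw [if_neg hc] at ht
      rcases List.mem_cons.1 (List.mem_reverse.1 ht) with h | h
      · subst h
        simp only [ne_eq, List.reverse_eq_nil_iff]
        simpa [List.isEmpty_iff] using hc
      · exact hacc t h
  | cons c rest ih =>
    intro cur acc hacc t ht
    rw [PySem.Chars.split₀.go] at ht
    by_cases hsp : PySem.Chars.isspace c
    · rw [if_pos hsp] at ht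
      by_cases hc : cur.isEmpty
      · rw [if_pos hc] at ht
        exact ih [] acc hacc t ht
      · rw [if_neg hc] at ht
        refine ih [] (cur.reverse :: acc) ?_ t ht
        intro u hu
        rcases List.mem_cons.1 hu with h | h
        · subst h
          simp only [ne_eq, List.reverse_eq_nil_iff]
          simpa [List.isEmpty_iff] using hc
        · exact hacc u h
    · rw [if_neg hsp] at ht
      exact ih (c :: cur) acc hacc t ht

lemma split₀_ne_nil (s : List Char) : ∀ t ∈ PySem.Chars.split₀ s, t ≠ [] := by
  intro t ht
  exact split₀_go_ne_nil s [] [] (by simp) t ht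

lemma join_nil_flatten (ps : List (List Char)) : PySem.Chars.join [] ps = ps.flatten := by
  unfold PySem.Chars.join List.intercalate
  induction ps with
  | nil => rfl
  | cons a t ih =>
    cases t with
    | nil => simp
    | cons b t2 =>
      simp only [List.intersperse] at *
      simp_all

-- last char of an append with nonempty tail
lemma pyGetD_last_append (X wc : List Char) (hwc : wc ≠ []) :
    PySem.List.pyGetD (X ++ wc) (-1) ' ' = PySem.List.pyGetD wc (-1) ' ' := by
  rw [PySem.List.pyGetD_neg_one _ _ (by simp [hwc]), PySem.List.pyGetD_neg_one _ _ hwc]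
  exact List.getLast_append_of_ne_nil (by simp [hwc]) hwc



-- single emitB step: the joined pieces follow emitA
lemma emit_step_fst (pieces : List (List Char)) (w : List Char) :
    PySem.Chars.join [] ((emitB (pieces,
        decide (PySem.Chars.join [] pieces ≠ [] ∧
          (PySem.List.pyGetD (PySem.Chars.join [] pieces) (-1) ' ') ∈ (['.', '?', '!'] : List Char))) w)).1
      = emitA (PySem.Chars.join [] pieces) w := by
  by_cases hcond : (PySem.Chars.join [] pieces ≠ [] ∧
      (PySem.List.pyGetD (PySem.Chars.join [] pieces) (-1) ' ') ∈ (['.', '?', '!'] : List Char))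
  · simp only [emitB, emitA]
    rw [show (decide (PySem.Chars.join [] pieces ≠ [] ∧
      (PySem.List.pyGetD (PySem.Chars.join [] pieces) (-1) ' ') ∈ (['.', '?', '!'] : List Char))) = true
      from by simp [hcond], if_pos hcond, if_pos (rfl : (true : Bool) = true)]
    split_ifs <;> simp [join_nil_flatten, List.flatten_append]
  · simp only [emitB, emitA]
    rw [show (decide (PySem.Chars.join [] pieces ≠ [] ∧
      (PySem.List.pyGetD (PySem.Chars.join [] pieces) (-1) ' ') ∈ (['.', '?', '!'] : List Char))) = false
      from by simpa using hcond, if_neg hcond,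
      if_neg (by simp : ¬ ((false : Bool) = true))]
    split_ifs <;> simp [join_nil_flatten, List.flatten_append]

-- single emitB step: the flag is the condition recomputed from the new string
lemma emit_step_snd (pieces : List (List Char)) (w : List Char) (hw : w ≠ []) :
    ((emitB (pieces,
        decide (PySem.Chars.join [] pieces ≠ [] ∧
          (PySem.List.pyGetD (PySem.Chars.join [] pieces) (-1) ' ') ∈ (['.', '?', '!'] : List Char))) w)).2
      = decide (emitA (PySem.Chars.join [] pieces) w ≠ [] ∧
          (PySem.List.pyGetD (emitA (PySem.Chars.join [] pieces) w) (-1) ' ') ∈ (['.', '?', '!'] : List Char)) := by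
  by_cases hcond : (PySem.Chars.join [] pieces ≠ [] ∧
      (PySem.List.pyGetD (PySem.Chars.join [] pieces) (-1) ' ') ∈ (['.', '?', '!'] : List Char))
  · have hwcne : pyCapitalize w ≠ [] := by
      rcases w with _ | ⟨c, t⟩
      · exact absurd rfl hw
      · simp [pyCapitalize]
    simp only [emitB, emitA]
    refine decide_eq_decide.mpr ?_
    rw [show (decide (PySem.Chars.join [] pieces ≠ [] ∧
      (PySem.List.pyGetD (PySem.Chars.join [] pieces) (-1) ' ') ∈ (['.', '?', '!'] : List Char))) = true
      from by simp [hcond], if_pos hcond, if_pos (rfl : (true : Bool) = true)]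
    rw [pyGetD_last_append _ _ hwcne]
    exact (and_iff_right (by simp [hwcne])).symm
  · have hwcne : PySem.Chars.lower w ≠ [] := by
      rcases w with _ | ⟨c, t⟩
      · exact absurd rfl hw
      · simp [PySem.Chars.lower]
    simp only [emitB, emitA]
    refine decide_eq_decide.mpr ?_
    rw [show (decide (PySem.Chars.join [] pieces ≠ [] ∧
      (PySem.List.pyGetD (PySem.Chars.join [] pieces) (-1) ' ') ∈ (['.', '?', '!'] : List Char))) = false
      from by simpa using hcond, if_neg hcond,
      if_neg (by simp : ¬ ((false : Bool) = true))]
    rw [pyGetD_last_append _ _ hwcne]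
    exact (and_iff_right (by simp [hwcne])).symm

lemma emit_corr : ∀ (ws : List (List Char)), (∀ w ∈ ws, w ≠ []) → ∀ (pieces : List (List Char)),
    PySem.Chars.join [] (ws.foldl emitB (pieces,
        decide (PySem.Chars.join [] pieces ≠ [] ∧
          (PySem.List.pyGetD (PySem.Chars.join [] pieces) (-1) ' ') ∈ (['.', '?', '!'] : List Char)))).1
      = ws.foldl emitA (PySem.Chars.join [] pieces) := by
  intro ws
  induction ws with
  | nil => intro _ _; rfl
  | cons w ws ih =>
    intro hne pieces
    have hwne : w ≠ [] := hne w (by simp)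
    have hrest : ∀ u ∈ ws, u ≠ [] := fun u hu => hne u (List.mem_cons_of_mem _ hu)
    simp only [List.foldl_cons]
    have hst := emit_step_snd pieces w hwne
    have hfst := emit_step_fst pieces w
    set st := emitB (pieces,
        decide (PySem.Chars.join [] pieces ≠ [] ∧
          (PySem.List.pyGetD (PySem.Chars.join [] pieces) (-1) ' ') ∈ (['.', '?', '!'] : List Char))) w with hstdef
    have : st = (st.1, decide (PySem.Chars.join [] st.1 ≠ [] ∧
        (PySem.List.pyGetD (PySem.Chars.join [] st.1) (-1) ' ') ∈ (['.', '?', '!'] : List Char))) := by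
      rw [Prod.ext_iff]
      exact ⟨rfl, by rw [hst, decide_eq_decide, hfst]⟩
    rw [this, ih hrest st.1, hfst]

lemma words_ne_nil (sign : List String) :
    ∀ w ∈ (pvCols (sign.map (fun s => PySem.Chars.split₀ s.toList))).flatten, w ≠ [] := by
  intro w hw
  rcases List.mem_flatten.1 hw with ⟨col, hcol, hwc⟩
  rcases List.mem_map.1 hcol with ⟨j, _, rfl⟩
  rcases List.mem_filterMap.1 hwc with ⟨l, hl, hsome⟩
  rcases List.mem_map.1 hl with ⟨s, _, rfl⟩
  exact split₀_ne_nil s.toList w (List.mem_of_getElem? hsome)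

-- A's outer/inner loops collapse to one emitA fold over the flattened columns
lemma outA_eq (s0 : String) (rest : List String) :
    (List.foldl
      (fun output i =>
        List.foldl
          (fun output p => if i < p.1 then emitA output ((PySem.List.pyGet? p.2 i).getD []) else output) output
          ((((PySem.Chars.split₀ s0.toList).length : Int), PySem.Chars.split₀ s0.toList) ::
            List.map (fun line => (((PySem.Chars.split₀ line.toList).length : Int), PySem.Chars.split₀ line.toList))
              rest))
      []
      (PySem.List.pyRange 0
        (List.foldl (fun acc x => if acc.1 < x.1 ∨ acc.1 = x.1 ∧ acc.2 < x.2 then x else acc)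
            (((PySem.Chars.split₀ s0.toList).length : Int), PySem.Chars.split₀ s0.toList)
            (List.map (fun line => (((PySem.Chars.split₀ line.toList).length : Int), PySem.Chars.split₀ line.toList))
              rest)).1 1))
    = ((pvCols ((s0 :: rest).map (fun s => PySem.Chars.split₀ s.toList))).flatten).foldl emitA [] := by
  have hn : (List.foldl (fun acc x => if acc.1 < x.1 ∨ acc.1 = x.1 ∧ acc.2 < x.2 then x else acc)
        (((PySem.Chars.split₀ s0.toList).length : Int), PySem.Chars.split₀ s0.toList)
        (List.map (fun line => (((PySem.Chars.split₀ line.toList).length : Int), PySem.Chars.split₀ line.toList))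
          rest)).1
      = (pvMaxLen ((s0 :: rest).map (fun s => PySem.Chars.split₀ s.toList)) : Int) := by
    rw [fst_foldl_lex, List.foldl_map]
    rw [show (fun (a : Int) (line : String) => max a (((PySem.Chars.split₀ line.toList).length : Int)))
        = (fun (acc : Int) (x : String) => max acc (((fun line => (PySem.Chars.split₀ line.toList).length) x : Nat) : Int)) from rfl]
    rw [foldl_max_cast rest (fun line => (PySem.Chars.split₀ line.toList).length)
      ((PySem.Chars.split₀ s0.toList).length)]
    unfold pvMaxLen
    simp [List.foldl_map]
  rw [hn, PySem.List.pyRange_one]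
  simp only [sub_zero, Int.toNat_natCast, zero_add]
  rw [show ((((PySem.Chars.split₀ s0.toList).length : Int), PySem.Chars.split₀ s0.toList) ::
        List.map (fun line => (((PySem.Chars.split₀ line.toList).length : Int), PySem.Chars.split₀ line.toList)) rest)
      = ((s0 :: rest).map (fun s => PySem.Chars.split₀ s.toList)).map (fun l => ((l.length : Int), l)) from by
    simp [List.map_map]]
  rw [List.foldl_map]
  rw [show (fun (st : List Char) (k : Nat) =>
        ((((s0 :: rest).map (fun s => PySem.Chars.split₀ s.toList)).map (fun l => ((l.length : Int), l))).foldl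
          (fun output p => if (k : Int) < p.1 then emitA output ((PySem.List.pyGet? p.2 (k : Int)).getD []) else output) st))
      = (fun (st : List Char) (k : Nat) =>
          (pvColWords ((s0 :: rest).map (fun s => PySem.Chars.split₀ s.toList)) k).foldl emitA st) from by
    funext st k
    exact inner_fold_col _ k st]
  rw [← List.foldl_map]
  rw [← List.foldl_flatten]
  rfl

lemma roadSignsA_eq (s0 : String) (rest : List String) :
    roadSigns (s0 :: rest)
      = (let out := ((pvCols ((s0 :: rest).map (fun s => PySem.Chars.split₀ s.toList))).flatten).foldl emitA []
         String.ofList (PySem.Chars.upper (PySem.List.slice out (some 1) (some 2)) ++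
                        PySem.List.slice out (some 2) none)) := by
  simp only [roadSigns, List.map_cons]
  rw [outA_eq]
  simp only [List.map_cons]

-- B's whole computation, rewritten as one emitB fold over the flattened columns
lemma roadSignsB_eq (sign : List String) :
    roadSigns_alt sign
      = (let s := PySem.Chars.join []
           ((((pvCols (sign.map (fun s => PySem.Chars.split₀ s.toList))).flatten).foldl emitB ([], false)).1)
         String.ofList (PySem.Chars.upper (PySem.List.slice s (some 1) (some 2)) ++
                        PySem.List.slice s (some 2) none)) := by
  simp only [roadSigns_alt]
  have hb : ∀ (bk : List (List (List Char))) (line : String),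
      (PySem.List.enumerate (PySem.Chars.split₀ line.toList) 0).foldl bucketStep bk
        = pvColAppend bk (PySem.Chars.split₀ line.toList) := by
    intro bk line
    have := enum_fold_colAppend (PySem.Chars.split₀ line.toList) bk 0 (Nat.zero_le _)
    simpa using this
  simp only [hb]
  rw [show List.foldl (fun bk line => pvColAppend bk (PySem.Chars.split₀ line.toList)) [] sign
      = pvCols (sign.map (fun s => PySem.Chars.split₀ s.toList)) from by
    rw [← foldl_colAppend_cols, List.foldl_map]]
  rw [← List.foldl_flatten]

-- ===== VERDICT (by name: the statement is the Claim_ definition above) =====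
theorem roadSigns_spec : Claim_equal_roadSigns := by
  intro sign hdom hpre
  unfold Spec_roadSigns
  match sign with
  | [] => exact absurd rfl hpre
  | s0 :: rest =>
    rw [roadSignsA_eq, roadSignsB_eq]
    simp only
    congr 1
    have h0 : (decide ((PySem.Chars.join [] ([] : List (List Char)) ≠ []) ∧
        (PySem.List.pyGetD (PySem.Chars.join [] ([] : List (List Char))) (-1) ' ')
          ∈ (['.', '?', '!'] : List Char))) = false := by decide
    have := emit_corr (((pvCols ((s0 :: rest).map (fun s => PySem.Chars.split₀ s.toList))).flatten))
      (words_ne_nil (s0 :: rest)) []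
    rw [h0] at this
    rw [show PySem.Chars.join [] ([] : List (List Char)) = [] from rfl] at this
    rw [this]
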